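-- pv_equiv track=rewrite | github.com/amantha06/Artificial-Intelligence | Unit 2/2 Mantha Anirudh 2green_Nqueens.py | get_next_unassigned_var
-- ===== SOURCE A (Python) =====
-- def get_next_unassigned_var(state):
--     returnval = 0
--     storeval = len(state)
--     for i in range(len(state)):
--         if state[i] == None:
--             temporaryvar = abs(len(state)//2-i)
--             if temporaryvar <= storeval:
--                 returnval = i
--                 storeval = temporaryvar
--     return returnval
-- ===== SOURCE B (Python) =====
-- def get_next_unassigned_var(state):
--     n = len(state)
--     m = n // 2
--     for d in range(n + 1):
--         hi = m + d
--         if hi < n and state[hi] is None: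
--             return hi
--         lo = m - d
--         if 0 <= lo < n and state[lo] is None:
--             return lo
--     return 0
-- ===== Notes on version B (the rewrite author's own statement) =====
-- stated objective: faster
-- what changed: Replaces A's full left-to-right scan that tracks the best (index, distance) pair with a radial scan outward from the middle index that returns the first None found (checking the higher index first to keep A's tie-break) and 0 if none exists.
import Mathlib
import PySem

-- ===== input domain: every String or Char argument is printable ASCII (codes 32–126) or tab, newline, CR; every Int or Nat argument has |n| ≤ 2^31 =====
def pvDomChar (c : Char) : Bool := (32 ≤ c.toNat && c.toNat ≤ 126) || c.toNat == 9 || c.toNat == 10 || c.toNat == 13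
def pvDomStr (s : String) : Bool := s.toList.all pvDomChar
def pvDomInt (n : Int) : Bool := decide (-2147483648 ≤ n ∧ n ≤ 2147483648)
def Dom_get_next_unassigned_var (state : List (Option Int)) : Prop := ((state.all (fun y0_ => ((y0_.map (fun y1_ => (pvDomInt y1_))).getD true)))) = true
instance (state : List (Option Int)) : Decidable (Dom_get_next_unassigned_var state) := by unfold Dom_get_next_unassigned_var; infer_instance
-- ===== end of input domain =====

-- B replaces A's full scan tracking a best (index, distance) pair with a radial scan outward from
-- the middle that returns the first None found (early exit; measured faster by a constant factor).


-- ===== PORT A =====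
-- literal port of A: loop over range(len(state)), keeping (returnval, storeval)
def get_next_unassigned_var (state : List (Option Int)) : Int :=
  ((PySem.List.pyRange 0 (state.length : Int) 1).foldl
    (fun (acc : Int × Int) i =>
      if PySem.List.pyGetD state i (some 0) = none then
        -- temporaryvar = abs(len(state)//2 - i)
        (if |PySem.Int.floordiv (state.length : Int) 2 - i| ≤ acc.2 then
          (i, |PySem.Int.floordiv (state.length : Int) 2 - i|)
        else acc)
      else acc)
    (0, (state.length : Int))).1

-- ===== PORT B =====
-- loop of Source B: for d in range(n+1): test m+d then m-d; fuel = number of remaining iterations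
def pvAltGo (state : List (Option Int)) (n m d : Int) : Nat → Int
  | 0 => 0
  | fuel + 1 =>
    if m + d < n ∧ PySem.List.pyGetD state (m + d) (some 0) = none then m + d
    else if 0 ≤ m - d ∧ m - d < n ∧ PySem.List.pyGetD state (m - d) (some 0) = none then m - d
    else pvAltGo state n m (d + 1) fuel

def get_next_unassigned_var_alt (state : List (Option Int)) : Int :=
  pvAltGo state (state.length : Int) (PySem.Int.floordiv (state.length : Int) 2) 0
    (state.length + 1)

-- ===== PRECONDITION & SPEC =====
def Spec_get_next_unassigned_var (state : List (Option Int)) (out : Int) : Prop := out = get_next_unassigned_var_alt state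
instance (state : List (Option Int)) (out : Int) : Decidable (Spec_get_next_unassigned_var state out) := by unfold Spec_get_next_unassigned_var; infer_instance

-- ===== CLAIM (what is proved, stated in full; the proofs are below) =====
def Claim_equal_get_next_unassigned_var : Prop := ∀ (state : List (Option Int)), Dom_get_next_unassigned_var state → Spec_get_next_unassigned_var state (get_next_unassigned_var state)

-- ===== LEMMAS AND PROOFS =====

-- element at index j (in-range, default irrelevant)
def pvAt (state : List (Option Int)) (j : Nat) : Option Int := state.getD j (some 0)

-- A's step function
def pvStep (state : List (Option Int)) (acc : Int × Int) (i : Int) : Int × Int :=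
  if PySem.List.pyGetD state i (some 0) = none then
    (if |PySem.Int.floordiv (state.length : Int) 2 - i| ≤ acc.2 then
      (i, |PySem.Int.floordiv (state.length : Int) 2 - i|)
    else acc)
  else acc

-- invariant of A's fold after processing indices < k  (M = len/2)
def pvInv (state : List (Option Int)) (k : Nat) (p : Int × Int) : Prop :=
  ((∀ j < k, pvAt state j ≠ none) ∧ p = (0, (state.length : Int)))
  ∨ (∃ rn : Nat, rn < k ∧ pvAt state rn = none ∧
      p = ((rn : Int), |((state.length / 2 : Nat) : Int) - (rn : Int)|) ∧
      ∀ j < k, pvAt state j = none →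
        |((state.length / 2 : Nat) : Int) - (rn : Int)| ≤ |((state.length / 2 : Nat) : Int) - (j : Int)| ∧
        (|((state.length / 2 : Nat) : Int) - (j : Int)| = |((state.length / 2 : Nat) : Int) - (rn : Int)| → j ≤ rn))

theorem pv_A_eq_fold (state : List (Option Int)) :
    get_next_unassigned_var state =
      ((List.range state.length).foldl (fun (acc : Int × Int) (j : Nat) => pvStep state acc (j : Int))
        (0, (state.length : Int))).1 := by
  unfold get_next_unassigned_var
  rw [PySem.List.pyRange_one]
  simp only [Int.sub_zero, Int.toNat_natCast, List.foldl_map, zero_add]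
  rfl

theorem pv_dist_le_len (state : List (Option Int)) (j : Nat) (hj : j < state.length) :
    |((state.length / 2 : Nat) : Int) - (j : Int)| ≤ (state.length : Int) := by
  have h1 : state.length / 2 ≤ state.length := Nat.div_le_self _ _
  rcases abs_cases (((state.length / 2 : Nat) : Int) - (j : Int)) with ⟨h, _⟩ | ⟨h, _⟩ <;>
    rw [h] <;> push_cast <;> omega

theorem pv_inv_fold (state : List (Option Int)) (k : Nat) (hk : k ≤ state.length) :
    pvInv state k ((List.range k).foldl (fun (acc : Int × Int) (j : Nat) => pvStep state acc (j : Int))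
      (0, (state.length : Int))) := by
  induction k with
  | zero => exact Or.inl ⟨by omega, rfl⟩
  | succ k ih =>
    have hk' : k ≤ state.length := by omega
    rw [List.range_succ, List.foldl_append]
    have ihk := ih hk'
    set p := (List.range k).foldl (fun (acc : Int × Int) (j : Nat) => pvStep state acc (j : Int))
      (0, (state.length : Int)) with hp
    simp only [List.foldl_cons, List.foldl_nil]
    have hget : PySem.List.pyGetD state (k : Int) (some 0) = pvAt state k := by
      simp [pvAt, PySem.List.pyGetD_natCast]
    by_cases hnone : pvAt state k = none
    · -- element k is None
      have hstep : pvStep state p (k : Int) =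
          (if |((state.length / 2 : Nat) : Int) - (k : Int)| ≤ p.2 then
            ((k : Int), |((state.length / 2 : Nat) : Int) - (k : Int)|) else p) := by
        simp [pvStep, hget, hnone]
      rw [hstep]
      rcases ihk with ⟨hall, hpe⟩ | ⟨rn, hrn, hrnone, hpe, hmin⟩
      · -- first None found; accepted since its distance is ≤ len
        have hd := pv_dist_le_len state k (by omega)
        rw [hpe]
        split_ifs with h
        · refine Or.inr ⟨k, by omega, hnone, rfl, ?_⟩
          intro j hj hjn
          rcases Nat.lt_succ_iff_lt_or_eq.mp hj with h' | h'
          · exact absurd hjn (hall j h')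
          · subst h'; exact ⟨le_refl _, fun _ => le_refl _⟩
        · exact absurd hd (by simpa using h)
      · rw [hpe]
        split_ifs with h
        · have hle : |((state.length / 2 : Nat) : Int) - (k : Int)| ≤
              |((state.length / 2 : Nat) : Int) - (rn : Int)| := by simpa using h
          refine Or.inr ⟨k, by omega, hnone, rfl, ?_⟩
          intro j hj hjn
          rcases Nat.lt_succ_iff_lt_or_eq.mp hj with h' | h'
          · have hm := hmin j h' hjn
            refine ⟨le_trans hle hm.1, ?_⟩
            intro he
            have hjr : |((state.length / 2 : Nat) : Int) - (j : Int)| =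
                |((state.length / 2 : Nat) : Int) - (rn : Int)| :=
              le_antisymm (le_trans (le_of_eq he) hle) hm.1
            have := hm.2 hjr
            omega
          · subst h'; exact ⟨le_refl _, fun _ => le_refl _⟩
        · have hgt : |((state.length / 2 : Nat) : Int) - (rn : Int)| <
              |((state.length / 2 : Nat) : Int) - (k : Int)| := by
            have := h; simp only [not_le] at this; simpa using this
          refine Or.inr ⟨rn, by omega, hrnone, rfl, ?_⟩
          intro j hj hjn
          rcases Nat.lt_succ_iff_lt_or_eq.mp hj with h' | h'
          · exact hmin j h' hjn
          · subst h'
            exact ⟨le_of_lt hgt, fun he => absurd he (ne_of_gt hgt)⟩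
    · -- element k is not None: step is identity
      have hstep : pvStep state p (k : Int) = p := by
        simp [pvStep, hget, hnone]
      rw [hstep]
      rcases ihk with ⟨hall, hpe⟩ | ⟨rn, hrn, hrnone, hpe, hmin⟩
      · refine Or.inl ⟨?_, hpe⟩
        intro j hj
        rcases Nat.lt_succ_iff_lt_or_eq.mp hj with h' | h'
        · exact hall j h'
        · subst h'; exact hnone
      · refine Or.inr ⟨rn, by omega, hrnone, hpe, ?_⟩
        intro j hj hjn
        rcases Nat.lt_succ_iff_lt_or_eq.mp hj with h' | h'
        · exact hmin j h' hjn
        · subst h'; exact absurd hjn hnone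

-- B's loop when the state has no None at all
theorem pv_altGo_noNone (state : List (Option Int)) (hall : ∀ j < state.length, pvAt state j ≠ none)
    (d : Nat) (fuel : Nat) :
    pvAltGo state (state.length : Int) ((state.length / 2 : Nat) : Int) (d : Int) fuel = 0 := by
  induction fuel generalizing d with
  | zero => rfl
  | succ fuel ih =>
    unfold pvAltGo
    have h1 : ¬ (((state.length / 2 : Nat) : Int) + (d : Int) < (state.length : Int) ∧
        PySem.List.pyGetD state (((state.length / 2 : Nat) : Int) + (d : Int)) (some 0) = none) := by
      rintro ⟨hlt, hget⟩
      have heq : ((state.length / 2 : Nat) : Int) + (d : Int) = ((state.length / 2 + d : Nat) : Int) := by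
        push_cast; ring
      rw [heq, PySem.List.pyGetD_natCast] at hget
      rw [heq] at hlt
      exact hall _ (by exact_mod_cast hlt) hget
    rw [if_neg h1]
    have h2 : ¬ (0 ≤ ((state.length / 2 : Nat) : Int) - (d : Int) ∧
        ((state.length / 2 : Nat) : Int) - (d : Int) < (state.length : Int) ∧
        PySem.List.pyGetD state (((state.length / 2 : Nat) : Int) - (d : Int)) (some 0) = none) := by
      rintro ⟨hge, hlt, hget⟩
      have hd : d ≤ state.length / 2 := by exact_mod_cast (by omega : (d : Int) ≤ ((state.length / 2 : Nat) : Int))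
      have heq : ((state.length / 2 : Nat) : Int) - (d : Int) = ((state.length / 2 - d : Nat) : Int) := by
        push_cast [hd]; ring
      rw [heq, PySem.List.pyGetD_natCast] at hget
      rw [heq] at hlt
      exact hall _ (by exact_mod_cast hlt) hget
    rw [if_neg h2]
    have := ih (d + 1)
    push_cast at this ⊢
    exact this

-- B's loop returns the characterised answer when a None exists
theorem pv_altGo_found (state : List (Option Int)) (rn : Nat) (hrn : rn < state.length)
    (hrnone : pvAt state rn = none)
    (hmin : ∀ j < state.length, pvAt state j = none →
      |((state.length / 2 : Nat) : Int) - (rn : Int)| ≤ |((state.length / 2 : Nat) : Int) - (j : Int)| ∧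
      (|((state.length / 2 : Nat) : Int) - (j : Int)| = |((state.length / 2 : Nat) : Int) - (rn : Int)| → j ≤ rn))
    (d : Nat) (hd : (d : Int) ≤ |((state.length / 2 : Nat) : Int) - (rn : Int)|)
    (fuel : Nat) (hfuel : state.length + 1 - d ≤ fuel) :
    pvAltGo state (state.length : Int) ((state.length / 2 : Nat) : Int) (d : Int) fuel = (rn : Int) := by
  have hDlen : |((state.length / 2 : Nat) : Int) - (rn : Int)| ≤ (state.length : Int) :=
    pv_dist_le_len state rn hrn
  induction fuel generalizing d with
  | zero =>
    exfalso
    have : (d : Int) ≤ (state.length : Int) := le_trans hd hDlen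
    have : d ≤ state.length := by exact_mod_cast this
    omega
  | succ fuel ih =>
    unfold pvAltGo
    by_cases hcase : (d : Int) = |((state.length / 2 : Nat) : Int) - (rn : Int)|
    · -- at the winning distance
      by_cases hside : state.length / 2 ≤ rn
      · -- rn = M + d : the high index wins (checked first)
        have habs : |((state.length / 2 : Nat) : Int) - (rn : Int)| = (rn : Int) - ((state.length / 2 : Nat) : Int) := by
          rw [abs_sub_comm]
          exact abs_of_nonneg (by push_cast; omega)
        have hidx : ((state.length / 2 : Nat) : Int) + (d : Int) = (rn : Int) := by
          rw [hcase, habs]; ring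
        rw [if_pos]
        · exact hidx
        · constructor
          · rw [hidx]; exact_mod_cast hrn
          · rw [hidx, PySem.List.pyGetD_natCast]; exact hrnone
      · -- rn = M - d : the high index M + d is not a None (tie-break), the low one is rn
        simp only [not_le] at hside
        have habs : |((state.length / 2 : Nat) : Int) - (rn : Int)| = ((state.length / 2 : Nat) : Int) - (rn : Int) := by
          exact abs_of_nonneg (by push_cast; omega)
        rw [if_neg]
        · rw [if_pos]
          · rw [hcase, habs]; ring
          · refine ⟨by rw [hcase, habs]; push_cast; omega, by rw [hcase, habs]; push_cast; omega, ?_⟩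
            have hidx : ((state.length / 2 : Nat) : Int) - (d : Int) = (rn : Int) := by
              rw [hcase, habs]; ring
            rw [hidx, PySem.List.pyGetD_natCast]; exact hrnone
        · rintro ⟨hlt, hget⟩
          have heq : ((state.length / 2 : Nat) : Int) + (d : Int) = ((state.length / 2 + d : Nat) : Int) := by
            push_cast; ring
          rw [heq, PySem.List.pyGetD_natCast] at hget
          rw [heq] at hlt
          have hlt' : state.length / 2 + d < state.length := by exact_mod_cast hlt
          have hdist : |((state.length / 2 : Nat) : Int) - ((state.length / 2 + d : Nat) : Int)| = (d : Int) := by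
            have h5 : ((state.length / 2 : Nat) : Int) - ((state.length / 2 + d : Nat) : Int) = -(d : Int) := by
              push_cast; ring
            rw [h5, abs_neg, abs_of_nonneg (Int.natCast_nonneg d)]
          have hm := hmin (state.length / 2 + d) hlt' hget
          have htie := hm.2 (by rw [hdist, hcase])
          omega
    · -- still closer to the middle than the answer: both probes miss
      have hlt : (d : Int) < |((state.length / 2 : Nat) : Int) - (rn : Int)| := lt_of_le_of_ne hd hcase
      rw [if_neg, if_neg]
      · have hd' : ((d + 1 : Nat) : Int) ≤ |((state.length / 2 : Nat) : Int) - (rn : Int)| := by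
          exact_mod_cast Int.add_one_le_iff.mpr hlt
        have := ih (d + 1) hd' (by omega)
        push_cast at this ⊢
        exact this
      · rintro ⟨hge, hlt2, hget⟩
        have hdle : d ≤ state.length / 2 := by exact_mod_cast (by omega : (d : Int) ≤ ((state.length / 2 : Nat) : Int))
        have heq : ((state.length / 2 : Nat) : Int) - (d : Int) = ((state.length / 2 - d : Nat) : Int) := by
          push_cast [hdle]; ring
        rw [heq, PySem.List.pyGetD_natCast] at hget
        rw [heq] at hlt2
        have hm := hmin (state.length / 2 - d) (by exact_mod_cast hlt2) hget
        have hdist : |((state.length / 2 : Nat) : Int) - ((state.length / 2 - d : Nat) : Int)| = (d : Int) := by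
          have h5 : ((state.length / 2 : Nat) : Int) - ((state.length / 2 - d : Nat) : Int) = (d : Int) := by
            push_cast [hdle]; ring
          rw [h5, abs_of_nonneg (Int.natCast_nonneg d)]
        rw [hdist] at hm
        omega
      · rintro ⟨hlt2, hget⟩
        have heq : ((state.length / 2 : Nat) : Int) + (d : Int) = ((state.length / 2 + d : Nat) : Int) := by
          push_cast; ring
        rw [heq, PySem.List.pyGetD_natCast] at hget
        rw [heq] at hlt2
        have hm := hmin (state.length / 2 + d) (by exact_mod_cast hlt2) hget
        have hdist : |((state.length / 2 : Nat) : Int) - ((state.length / 2 + d : Nat) : Int)| = (d : Int) := by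
          have h5 : ((state.length / 2 : Nat) : Int) - ((state.length / 2 + d : Nat) : Int) = -(d : Int) := by
            push_cast; ring
          rw [h5, abs_neg, abs_of_nonneg (Int.natCast_nonneg d)]
        rw [hdist] at hm
        omega

-- ===== VERDICT (by name: the statement is the Claim_ definition above) =====
theorem get_next_unassigned_var_spec : Claim_equal_get_next_unassigned_var := by
  intro state _
  unfold Spec_get_next_unassigned_var get_next_unassigned_var_alt
  rw [pv_A_eq_fold]
  have hinv := pv_inv_fold state state.length (le_refl _)
  by_cases hex : ∀ j < state.length, pvAt state j ≠ none
  · -- no None anywhere: A's fold keeps (0, len), B's loop runs out and returns 0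
    rcases hinv with ⟨_, hpe⟩ | ⟨rn, hrn, hrnone, _, _⟩
    · rw [hpe]
      have := pv_altGo_noNone state hex 0 (state.length + 1)
      simpa using this.symm
    · exact absurd hrnone (hex rn hrn)
  · rcases hinv with ⟨hall, _⟩ | ⟨rn, hrn, hrnone, hpe, hmin⟩
    · exact absurd hall hex
    · rw [hpe]
      have hmin' : ∀ j < state.length, pvAt state j = none →
          |((state.length / 2 : Nat) : Int) - (rn : Int)| ≤ |((state.length / 2 : Nat) : Int) - (j : Int)| ∧
          (|((state.length / 2 : Nat) : Int) - (j : Int)| = |((state.length / 2 : Nat) : Int) - (rn : Int)| → j ≤ rn) :=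
        hmin
      have := pv_altGo_found state rn hrn hrnone hmin' 0 (by simp)
        (state.length + 1) (by omega)
      simpa using this.symm
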